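-- pv_equiv track=rewrite | github.com/hiche-m/arabic_text_prediction_tool | assets/taln.py | searchSeq
-- ===== SOURCE A (Python) =====
-- def searchSeq(data, sequence):  #Fonction de recherche
--     indices = []
--     seq_len = len(sequence)
--     for i, sublist in enumerate(data):
--         for j in range(len(sublist) - seq_len + 1):
--             if sublist[j:j + seq_len] == sequence:
--                 indices.append((i, j))
--     return indices  #Retourne une liste des indices ou la séquence de mots ou bien le mot est trouvé
-- ===== SOURCE B (Python) =====
-- def _kmp_fail(pat):
--     # failure table: fail[i] = length of longest proper border of pat[:i+1]
--     fail = [0] * len(pat)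
--     q = 0
--     for i in range(1, len(pat)):
--         while q > 0 and pat[i] != pat[q]:
--             q = fail[q - 1]
--         if pat[i] == pat[q]:
--             q += 1
--         fail[i] = q
--     return fail
--
-- def _kmp_find(text, pat, fail):
--     # one left-to-right pass; yields all start positions of pat in text
--     out = []
--     q = 0
--     k = len(pat)
--     for j, x in enumerate(text):
--         while q > 0 and x != pat[q]:
--             q = fail[q - 1]
--         if x == pat[q]:
--             q += 1
--         if q == k:
--             out.append(j + 1 - k)
--             q = fail[q - 1]
--     return out
--
-- def searchSeq(data, sequence):
--     k = len(sequence)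
--     if k == 0:
--         return [(i, j) for i, sub in enumerate(data) for j in range(len(sub) + 1)]
--     fail = _kmp_fail(sequence)
--     return [(i, j) for i, sub in enumerate(data) for j in _kmp_find(sub, sequence, fail)]
-- ===== Notes on version B (the rewrite author's own statement) =====
-- stated objective: alternative
-- what changed: Replaces A's per-start-position slice-and-compare scan with Knuth-Morris-Pratt matching: a failure table built once from the sequence and a single left-to-right pass over each sublist; asymptotically O(N*(m+k)) vs A's O(N*m*k), though not measurably faster in CPython where A's slicing runs at C speed.
import Mathlib
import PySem

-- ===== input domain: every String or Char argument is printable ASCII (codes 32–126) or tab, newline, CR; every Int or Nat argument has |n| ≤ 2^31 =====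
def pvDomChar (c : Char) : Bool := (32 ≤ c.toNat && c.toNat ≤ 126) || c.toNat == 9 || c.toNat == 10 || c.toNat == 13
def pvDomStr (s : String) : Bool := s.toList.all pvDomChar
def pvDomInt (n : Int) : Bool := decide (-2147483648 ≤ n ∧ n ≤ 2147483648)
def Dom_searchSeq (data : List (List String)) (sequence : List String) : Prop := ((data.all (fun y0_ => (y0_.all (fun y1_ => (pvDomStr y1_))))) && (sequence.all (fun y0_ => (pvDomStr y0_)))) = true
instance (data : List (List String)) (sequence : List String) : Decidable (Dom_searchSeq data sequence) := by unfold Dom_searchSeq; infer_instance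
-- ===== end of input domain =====

-- B replaces A's per-position slice comparison by a single KMP pass per sublist (failure table built once); return value identical.

-- ===== PORT A =====
def searchSeq (data : List (List String)) (sequence : List String) : List (Int × Int) :=
  let seqLen : Int := sequence.length
  (PySem.List.enumerate data 0).foldl (fun indices p =>
    (PySem.List.pyRange 0 ((p.2.length : Int) - seqLen + 1) 1).foldl (fun ind j =>
      if PySem.List.slice p.2 (some j) (some (j + seqLen)) = sequence then ind ++ [(p.1, j)] else ind)
      indices) []

-- ===== PORT B =====
-- the `while q > 0 and x != pat[q]: q = fail[q-1]` loop; fuel = current q (each step strictly decreases q)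
def kmpFall (pat : List String) (fail : List Nat) (x : String) : Nat → Nat → Nat
  | 0, q => q
  | fuel+1, q => if 0 < q ∧ ¬ x = pat.getD q "" then kmpFall pat fail x fuel (fail.getD (q-1) 0) else q

-- the `for i in range(1, len(pat))` loop of _kmp_fail
def kmpBuildGo (pat : List String) (fail : List Nat) (q i : Nat) : List Nat :=
  if h : i < pat.length then
    let x := pat.getD i ""
    let q1 := kmpFall pat fail x q q
    let q2 := if x = pat.getD q1 "" then q1 + 1 else q1
    kmpBuildGo pat (fail.set i q2) q2 (i+1)
  else fail
termination_by pat.length - i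

def kmpFail (pat : List String) : List Nat :=
  kmpBuildGo pat (List.replicate pat.length 0) 0 1

-- _kmp_find's `for j, x in enumerate(text)` loop
def kmpFind (pat : List String) (fail : List Nat) : List String → Nat → Nat → List Nat
  | [], _, _ => []
  | x :: rest, j, q =>
    let q1 := kmpFall pat fail x q q
    let q2 := if x = pat.getD q1 "" then q1 + 1 else q1
    if q2 = pat.length then
      (j + 1 - pat.length) :: kmpFind pat fail rest (j+1) (fail.getD (q2-1) 0)
    else
      kmpFind pat fail rest (j+1) q2

def searchSeq_alt (data : List (List String)) (sequence : List String) : List (Int × Int) :=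
  let k := sequence.length
  if k = 0 then
    (PySem.List.enumerate data 0).flatMap (fun p => (List.range (p.2.length + 1)).map (fun j : Nat => (p.1, (j : Int))))
  else
    let fail := kmpFail sequence
    (PySem.List.enumerate data 0).flatMap (fun p => (kmpFind sequence fail p.2 0 0).map (fun j : Nat => (p.1, (j : Int))))

-- ===== PRECONDITION & SPEC =====
def Spec_searchSeq (data : List (List String)) (sequence : List String) (out : List (Int × Int)) : Prop := out = searchSeq_alt data sequence
instance (data : List (List String)) (sequence : List String) (out : List (Int × Int)) : Decidable (Spec_searchSeq data sequence out) := by unfold Spec_searchSeq; infer_instance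

-- ===== CLAIM (what is proved, stated in full; the proofs are below) =====
def Claim_equal_searchSeq : Prop := ∀ (data : List (List String)) (sequence : List String), Dom_searchSeq data sequence → Spec_searchSeq data sequence (searchSeq data sequence)

-- ===== LEMMAS AND PROOFS =====

-- length of the longest proper border of pat.take n
def bordP (pat : List String) (n : Nat) : Nat :=
  Nat.findGreatest (fun l => pat.take l <:+ pat.take n) (n-1)

-- KMP invariant: longest l ≤ min (k-1) |t| with pat.take l a suffix of t
def kQ (pat t : List String) : Nat :=
  Nat.findGreatest (fun l => pat.take l <:+ t) (min (pat.length - 1) t.length)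

def FailOk (pat : List String) (fail : List Nat) (m : Nat) : Prop :=
  ∀ j, j < m → fail.getD j 0 = bordP pat (j+1)

theorem fg_eq_of_max {P : Nat → Prop} [DecidablePred P] {n v : Nat}
    (hv : P v) (hvn : v ≤ n) (hmax : ∀ l, l ≤ n → P l → l ≤ v) :
    Nat.findGreatest P n = v :=
  le_antisymm (hmax _ (Nat.findGreatest_le n) (Nat.findGreatest_spec hvn hv))
    (Nat.le_findGreatest hvn hv)

theorem fg_eq {P Q : Nat → Prop} [DecidablePred P] [DecidablePred Q] {n n' : Nat}
    (hP0 : P 0) (hQ0 : Q 0)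
    (h1 : ∀ l, l ≤ n → P l → Q l ∧ l ≤ n') (h2 : ∀ l, l ≤ n' → Q l → P l ∧ l ≤ n) :
    Nat.findGreatest P n = Nat.findGreatest Q n' := by
  apply le_antisymm
  · have hp := Nat.findGreatest_spec (Nat.zero_le n) hP0
    have h := h1 _ (Nat.findGreatest_le n) hp
    exact Nat.le_findGreatest h.2 h.1
  · have hq := Nat.findGreatest_spec (Nat.zero_le n') hQ0
    have h := h2 _ (Nat.findGreatest_le n') hq
    exact Nat.le_findGreatest h.2 h.1

theorem suffix_of_suffix_le {α : Type} {a b t : List α}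
    (ha : a <:+ t) (hb : b <:+ t) (hl : a.length ≤ b.length) : a <:+ b := by
  obtain ⟨w1, hw1⟩ := ha
  obtain ⟨w2, hw2⟩ := hb
  have hw : w1 ++ a = w2 ++ b := hw1.trans hw2.symm
  rcases List.append_eq_append_iff.mp hw with ⟨a', _, h2⟩ | ⟨c', _, h2⟩
  · have : a'.length = 0 := by
      have := congrArg List.length h2
      simp at this; omega
    rw [List.length_eq_zero_iff] at this
    subst this; simp at h2; subst h2; exact List.suffix_refl _
  · exact ⟨c', h2.symm⟩

theorem snoc_suffix_snoc_iff {α : Type} {u v : List α} {y x : α} :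
    (u ++ [y]) <:+ (v ++ [x]) ↔ u <:+ v ∧ y = x := by
  constructor
  · rintro ⟨w, hw⟩
    rw [← List.append_assoc] at hw
    have := List.append_inj' hw (by simp)
    refine ⟨⟨w, this.1⟩, by simpa using this.2⟩
  · rintro ⟨⟨w, rfl⟩, rfl⟩
    exact ⟨w, by simp⟩

theorem take_succ_getD {pat : List String} {l : Nat} (h : l < pat.length) :
    pat.take (l+1) = pat.take l ++ [pat.getD l ""] := by
  rw [List.take_add_one, List.getElem?_eq_getElem h, List.getD_eq_getElem _ _ h]
  rfl

theorem take_suffix_snoc_iff {pat t : List String} {x : String} {l : Nat} (h : l < pat.length) :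
    pat.take (l+1) <:+ (t ++ [x]) ↔ (pat.take l <:+ t ∧ pat.getD l "" = x) := by
  rw [take_succ_getD h, snoc_suffix_snoc_iff]

theorem kQ_suffix (pat t : List String) : pat.take (kQ pat t) <:+ t := by
  have h := Nat.findGreatest_spec (P := fun l => pat.take l <:+ t)
      (n := min (pat.length - 1) t.length) (m := 0) (Nat.zero_le _) (by simp)
  simpa [kQ] using h

theorem kQ_le (pat t : List String) : kQ pat t ≤ min (pat.length - 1) t.length := by
  unfold kQ; exact Nat.findGreatest_le _

theorem bordP_suffix (pat : List String) (n : Nat) :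
    pat.take (bordP pat n) <:+ pat.take n := by
  have h := Nat.findGreatest_spec (P := fun l => pat.take l <:+ pat.take n)
      (n := n - 1) (m := 0) (Nat.zero_le _) (by simp)
  simpa [bordP] using h

theorem kmpFall_spec (pat : List String) (fail : List Nat) (x : String) (m : Nat)
    (hf : FailOk pat fail m) (hm : m ≤ pat.length) :
    ∀ fuel q, q ≤ fuel → q ≤ m →
      kmpFall pat fail x fuel q ≤ q ∧
      pat.take (kmpFall pat fail x fuel q) <:+ pat.take q ∧
      (kmpFall pat fail x fuel q = 0 ∨ x = pat.getD (kmpFall pat fail x fuel q) "") ∧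
      (∀ b, b ≤ q → pat.take b <:+ pat.take q → x = pat.getD b "" → b ≤ kmpFall pat fail x fuel q) := by
  intro fuel
  induction fuel with
  | zero =>
    intro q hq _
    interval_cases q
    refine ⟨le_refl _, List.suffix_refl _, Or.inl rfl, ?_⟩
    intro b hb _ _; omega
  | succ fuel ih =>
    intro q hqf hqm
    by_cases hg : 0 < q ∧ ¬ x = pat.getD q ""
    · have hq0 := hg.1
      have hfq : fail.getD (q-1) 0 = bordP pat q := by
        have := hf (q-1) (by omega)
        rwa [Nat.sub_add_cancel hq0] at this
      have hq'lt : fail.getD (q-1) 0 < q := by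
        rw [hfq]; unfold bordP
        have := Nat.findGreatest_le (P := fun l => pat.take l <:+ pat.take q) (q-1)
        omega
      have hunf : kmpFall pat fail x (fuel+1) q = kmpFall pat fail x fuel (fail.getD (q-1) 0) := by
        simp only [kmpFall, if_pos hg]
      set q' := fail.getD (q-1) 0 with hq'
      have pq' : pat.take q' <:+ pat.take q := by rw [hfq]; exact bordP_suffix pat q
      have hrec := ih q' (by omega) (by omega)
      obtain ⟨r1, r2, r3, r4⟩ := hrec
      rw [hunf]
      refine ⟨by omega, r2.trans pq', r3, ?_⟩
      intro b hb hbs hbx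
      have hbq : b < q := by
        rcases Nat.lt_or_ge b q with h | h
        · exact h
        · exfalso; have : b = q := by omega
          subst this; exact hg.2 hbx
      have hbq' : b ≤ q' := by
        rw [hfq]; unfold bordP
        exact Nat.le_findGreatest (by omega) hbs
      refine r4 b hbq' ?_ hbx
      exact suffix_of_suffix_le hbs pq' (by
        rw [List.length_take, List.length_take]; omega)
    · have hunf : kmpFall pat fail x (fuel+1) q = q := by
        simp only [kmpFall, if_neg hg]
      rw [hunf]
      refine ⟨le_refl _, List.suffix_refl _, ?_, fun b hb _ _ => hb⟩
      by_cases h0 : q = 0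
      · exact Or.inl h0
      · right
        rcases not_and_or.mp hg with h | h
        · omega
        · exact not_not.mp h

theorem kmp_step (pat : List String) (fail : List Nat) (m : Nat)
    (hf : FailOk pat fail m) (hm : m ≤ pat.length) (hk : 0 < pat.length)
    (t : List String) (x : String) (hqm : kQ pat t ≤ m) :
    (if x = pat.getD (kmpFall pat fail x (kQ pat t) (kQ pat t)) "" then
        kmpFall pat fail x (kQ pat t) (kQ pat t) + 1
      else kmpFall pat fail x (kQ pat t) (kQ pat t))
      = Nat.findGreatest (fun l => pat.take l <:+ t ++ [x]) (min pat.length (t.length+1)) := by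
  set q := kQ pat t with hq
  have hqb : q ≤ min (pat.length - 1) t.length := Nat.findGreatest_le _
  have hqt : pat.take q <:+ t := kQ_suffix pat t
  obtain ⟨r1, r2, r3, r4⟩ := kmpFall_spec pat fail x m hf hm q q (le_refl _) hqm
  set r := kmpFall pat fail x q q with hr
  have hrt : pat.take r <:+ t := r2.trans hqt
  have hrk : r < pat.length := by omega
  symm
  by_cases hx : x = pat.getD r ""
  · rw [if_pos hx]
    apply fg_eq_of_max
    · exact (take_suffix_snoc_iff hrk).mpr ⟨hrt, hx.symm⟩
    · omega
    · intro l hl hls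
      match l with
      | 0 => omega
      | l' + 1 =>
        have hl'k : l' < pat.length := by omega
        obtain ⟨h1, h2⟩ := (take_suffix_snoc_iff hl'k).mp hls
        have hl'q : l' ≤ q := Nat.le_findGreatest (by omega) h1
        have : l' ≤ r := r4 l' hl'q
          (suffix_of_suffix_le h1 hqt (by rw [List.length_take, List.length_take]; omega)) h2.symm
        omega
  · rw [if_neg hx]
    have hr0 : r = 0 := by
      rcases r3 with h | h
      · exact h
      · exact absurd h hx
    apply fg_eq_of_max
    · rw [hr0]; simp
    · omega
    · intro l hl hls
      match l with
      | 0 => omega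
      | l' + 1 =>
        have hl'k : l' < pat.length := by omega
        obtain ⟨h1, h2⟩ := (take_suffix_snoc_iff hl'k).mp hls
        have hl'q : l' ≤ q := Nat.le_findGreatest (by omega) h1
        have hl'r : l' ≤ r := r4 l' hl'q
          (suffix_of_suffix_le h1 hqt (by rw [List.length_take, List.length_take]; omega)) h2.symm
        exfalso
        have : l' = 0 := by omega
        subst this
        rw [hr0] at hx
        exact hx h2.symm

theorem kmp_next (pat : List String) (fail : List Nat)
    (hf : FailOk pat fail pat.length) (hk : 0 < pat.length) (t : List String) (x : String) :
    (let q2 := if x = pat.getD (kmpFall pat fail x (kQ pat t) (kQ pat t)) "" then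
        kmpFall pat fail x (kQ pat t) (kQ pat t) + 1
      else kmpFall pat fail x (kQ pat t) (kQ pat t);
     if q2 = pat.length then fail.getD (q2-1) 0 else q2) = kQ pat (t ++ [x]) := by
  have hqm : kQ pat t ≤ pat.length := by
    have := Nat.findGreatest_le (P := fun l => pat.take l <:+ t) (min (pat.length - 1) t.length)
    unfold kQ; omega
  have hstep := kmp_step pat fail pat.length hf (le_refl _) hk t x hqm
  set q2 := if x = pat.getD (kmpFall pat fail x (kQ pat t) (kQ pat t)) "" then
      kmpFall pat fail x (kQ pat t) (kQ pat t) + 1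
    else kmpFall pat fail x (kQ pat t) (kQ pat t) with hq2
  simp only
  by_cases hfull : q2 = pat.length
  · rw [if_pos hfull]
    have hP : pat <:+ t ++ [x] := by
      have := Nat.findGreatest_spec (P := fun l => pat.take l <:+ t ++ [x])
        (n := min pat.length (t.length+1)) (m := 0) (Nat.zero_le _) (by simp)
      rw [← hstep, hfull] at this
      simpa [List.take_length] using this
    have hlen : pat.length ≤ t.length + 1 := by
      have := hP.length_le; simpa using this
    have hfk : fail.getD (q2-1) 0 = bordP pat pat.length := by
      have h := hf (pat.length - 1) (by omega)
      rw [Nat.sub_add_cancel hk] at h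
      rw [hfull]; exact h
    rw [hfk]
    unfold bordP kQ
    apply fg_eq
    · simp
    · simp
    · intro l hl hPl
      have hPl' : pat.take l <:+ pat := by rwa [List.take_length] at hPl
      refine ⟨hPl'.trans hP, ?_⟩
      simp only [List.length_append, List.length_cons, List.length_nil]
      omega
    · intro l hl hQl
      constructor
      · rw [List.take_length]
        exact suffix_of_suffix_le hQl hP (by rw [List.length_take]; omega)
      · omega
  · rw [if_neg hfull]
    have hq2b : q2 ≤ min pat.length (t.length + 1) := by
      rw [hstep]; exact Nat.findGreatest_le _
    unfold kQ
    symm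
    apply fg_eq_of_max
    · have := Nat.findGreatest_spec (P := fun l => pat.take l <:+ t ++ [x])
        (n := min pat.length (t.length+1)) (m := 0) (Nat.zero_le _) (by simp)
      rw [← hstep] at this
      exact this
    · simp only [List.length_append, List.length_cons, List.length_nil]
      omega
    · intro l hl hPl
      simp only [List.length_append, List.length_cons, List.length_nil] at hl
      rw [hstep]
      exact Nat.le_findGreatest (by omega) hPl

theorem kmpBuildGo_spec (pat : List String) :
    ∀ d i (fail : List Nat) q, pat.length - i ≤ d → 1 ≤ i → fail.length = pat.length →
      FailOk pat fail i → q = kQ pat ((pat.drop 1).take (i-1)) →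
      FailOk pat (kmpBuildGo pat fail q i) pat.length := by
  intro d
  induction d with
  | zero =>
    intro i fail q hd hi hlen hfo hq
    have hge : ¬ i < pat.length := by omega
    rw [kmpBuildGo, dif_neg hge]
    intro j hj; exact hfo j (by omega)
  | succ d ih =>
    intro i fail q hd hi hlen hfo hq
    by_cases hlt : i < pat.length
    · rw [kmpBuildGo, dif_pos hlt]
      simp only
      set x := pat.getD i "" with hx
      set t := (pat.drop 1).take (i-1) with ht
      have htlen : t.length = i - 1 := by
        rw [ht, List.length_take, List.length_drop]; omega
      have hqm : q ≤ i := by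
        have := kQ_le pat t
        omega
      have hstep := kmp_step pat fail i hfo (le_of_lt hlt) (by omega) t x
        (by rw [← hq]; omega)
      rw [← hq] at hstep
      have hsnoc : t ++ [x] = (pat.drop 1).take i := by
        have hi1 : i - 1 < (pat.drop 1).length := by rw [List.length_drop]; omega
        have hts := take_succ_getD (pat := pat.drop 1) (l := i-1) hi1
        have hg : (pat.drop 1).getD (i-1) "" = pat.getD i "" := by
          rw [List.getD_eq_getElem _ _ hi1, List.getD_eq_getElem _ _ hlt, List.getElem_drop]
          congr 1; omega
        calc t ++ [x] = (pat.drop 1).take ((i-1)+1) := by rw [hts, hg, hx, ht]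
        _ = (pat.drop 1).take i := by rw [Nat.sub_add_cancel hi]
      have hmin1 : min pat.length (t.length + 1) = i := by omega
      have hq2' := hstep
      rw [hmin1, hsnoc] at hq2'
      have hkey : (pat.drop 1).take i = (pat.take (i+1)).drop 1 := by
        rw [List.drop_take]
        norm_num
      have hbord : bordP pat (i+1)
          = Nat.findGreatest (fun l => pat.take l <:+ (pat.drop 1).take i) i := by
        unfold bordP
        apply fg_eq
        · simp
        · simp
        · intro l hl hPl
          refine ⟨?_, by omega⟩
          rw [hkey]
          refine suffix_of_suffix_le hPl (List.drop_suffix 1 _) ?_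
          rw [List.length_take, List.length_drop, List.length_take]
          omega
        · intro l hl hQl
          refine ⟨?_, by omega⟩
          rw [hkey] at hQl
          exact hQl.trans (List.drop_suffix 1 _)
      apply ih (i+1) _ _
      · omega
      · omega
      · rw [List.length_set]; exact hlen
      · intro j hj
        rcases Nat.lt_or_ge j i with hji | hji
        · rw [List.getD_eq_getElem?_getD, List.getElem?_set_ne (by omega),
            ← List.getD_eq_getElem?_getD]
          exact hfo j hji
        · have hje : j = i := by omega
          subst hje
          rw [List.getD_eq_getElem?_getD, List.getElem?_set_self (by omega)]
          simp only [Option.getD_some]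
          rw [hq2', hbord]
      · rw [hq2']
        show _ = kQ pat ((pat.drop 1).take (i+1-1))
        have h1 : i + 1 - 1 = i := by omega
        rw [h1]
        unfold kQ
        congr 1
        rw [List.length_take, List.length_drop]
        omega
    · rw [kmpBuildGo, dif_neg hlt]
      intro j hj; exact hfo j (by omega)

theorem kmpFail_spec (pat : List String) (hk : 0 < pat.length) :
    FailOk pat (kmpFail pat) pat.length := by
  unfold kmpFail
  apply kmpBuildGo_spec pat pat.length 1 _ 0
  · omega
  · omega
  · simp
  · intro j hj
    have hje : j = 0 := by omega
    subst hje
    have h0 : (List.replicate pat.length (0:Nat)).getD 0 0 = 0 := by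
      rw [List.getD_eq_getElem?_getD, List.getElem?_replicate]
      split <;> simp
    rw [h0]
    unfold bordP
    simp
  · show (0:Nat) = kQ pat ((pat.drop 1).take (1-1))
    unfold kQ
    simp

theorem kmpFind_spec (pat : List String) (fail : List Nat)
    (hf : FailOk pat fail pat.length) (hk : 0 < pat.length) :
    ∀ (t T : List String),
      kmpFind pat fail t T.length (kQ pat T)
        = (List.range t.length).filterMap (fun d =>
            if pat <:+ T ++ t.take (d+1) then some (T.length + d + 1 - pat.length) else none) := by
  intro t
  induction t with
  | nil => intro T; simp [kmpFind]
  | cons x rest ih =>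
    intro T
    have hqm : kQ pat T ≤ pat.length := by have := kQ_le pat T; omega
    have hstep := kmp_step pat fail pat.length hf (le_refl _) hk T x hqm
    have hnext := kmp_next pat fail hf hk T x
    simp only at hnext
    rw [kmpFind]
    set q2 := if x = pat.getD (kmpFall pat fail x (kQ pat T) (kQ pat T)) "" then
        kmpFall pat fail x (kQ pat T) (kQ pat T) + 1
      else kmpFall pat fail x (kQ pat T) (kQ pat T) with hq2def
    have hiff : q2 = pat.length ↔ pat <:+ T ++ [x] := by
      constructor
      · intro h
        have hsp := Nat.findGreatest_spec (P := fun l => pat.take l <:+ T ++ [x])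
          (n := min pat.length (T.length+1)) (m := 0) (Nat.zero_le _) (by simp)
        rw [← hstep, h] at hsp
        simpa [List.take_length] using hsp
      · intro h
        have hlen : pat.length ≤ T.length + 1 := by
          have := h.length_le; simpa using this
        have hge : pat.length ≤ q2 := by
          rw [hstep]
          refine Nat.le_findGreatest (by omega) ?_
          simpa [List.take_length] using h
        have hle : q2 ≤ pat.length := by
          rw [hstep]
          exact le_trans (Nat.findGreatest_le _) (min_le_left _ _)
        omega
    -- decompose the RHS
    have hRHS : (List.range (x :: rest).length).filterMap (fun d =>
          if pat <:+ T ++ (x :: rest).take (d+1) then some (T.length + d + 1 - pat.length) else none)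
        = (if pat <:+ T ++ [x] then [T.length + 1 - pat.length] else [])
          ++ (List.range rest.length).filterMap (fun d =>
              if pat <:+ (T ++ [x]) ++ rest.take (d+1)
              then some ((T ++ [x]).length + d + 1 - pat.length) else none) := by
      have htail : ∀ d, (if pat <:+ T ++ x :: List.take (d + 1) rest
            then some (T.length + (d + 1) + 1 - pat.length) else none)
          = (if pat <:+ (T ++ [x]) ++ List.take (d + 1) rest
            then some ((T ++ [x]).length + d + 1 - pat.length) else none) := by
        intro d
        rw [← List.append_cons]
        have harith : T.length + (d + 1) + 1 = (T ++ [x]).length + d + 1 := by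
          simp only [List.length_append, List.length_cons, List.length_nil]; omega
        rw [harith]
      by_cases hc : pat <:+ T ++ [x]
      · simp only [List.length_cons, List.range_succ_eq_map, List.filterMap_cons,
          List.filterMap_map, List.take_succ_cons, List.take_zero, Nat.add_zero, if_pos hc,
          Function.comp_def, List.singleton_append]
        congr 1
        apply List.filterMap_congr
        intro d _
        exact htail d
      · simp only [List.length_cons, List.range_succ_eq_map, List.filterMap_cons,
          List.filterMap_map, List.take_succ_cons, List.take_zero, Nat.add_zero, if_neg hc,
          Function.comp_def, List.nil_append]
        apply List.filterMap_congr
        intro d _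
        exact htail d
    rw [hRHS]
    have hIH := ih (T ++ [x])
    have hlen1 : (T ++ [x]).length = T.length + 1 := by simp
    by_cases hem : pat <:+ T ++ [x]
    · rw [if_pos (hiff.mpr hem), if_pos hem]
      have hfd : fail.getD (q2-1) 0 = kQ pat (T ++ [x]) := by
        rw [← hnext, if_pos (hiff.mpr hem)]
      rw [hfd]
      simp only [List.cons_append, List.nil_append]
      congr 1
      rw [← hlen1]
      exact hIH
    · rw [if_neg (fun h => hem (hiff.mp h)), if_neg hem]
      have hq2' : q2 = kQ pat (T ++ [x]) := by
        rw [← hnext, if_neg (fun h => hem (hiff.mp h))]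
      rw [hq2', List.nil_append, ← hlen1]
      exact hIH

theorem reindex (pat : List String) (hk : 0 < pat.length) (t : List String) :
    (List.range t.length).filterMap (fun d =>
        if pat <:+ t.take (d+1) then some (d + 1 - pat.length) else none)
      = (List.range (t.length + 1 - pat.length)).filter
          (fun j => decide ((t.drop j).take pat.length = pat)) := by
  induction t using List.reverseRecOn with
  | nil =>
    have h1 : 1 - pat.length = 0 := by omega
    simp [h1]
  | append_singleton s x ih =>
    have hlen : (s ++ [x]).length = s.length + 1 := by simp
    rw [hlen]
    -- split the left side
    rw [List.range_succ, List.filterMap_append]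
    have hfirst : (List.range s.length).filterMap (fun d =>
          if pat <:+ (s ++ [x]).take (d+1) then some (d + 1 - pat.length) else none)
        = (List.range s.length).filterMap (fun d =>
          if pat <:+ s.take (d+1) then some (d + 1 - pat.length) else none) := by
      apply List.filterMap_congr
      intro d hd
      rw [List.mem_range] at hd
      rw [List.take_append_of_le_length (by omega)]
    rw [hfirst, ih]
    have hlastL : (List.filterMap (fun d =>
          if pat <:+ (s ++ [x]).take (d+1) then some (d + 1 - pat.length) else none) [s.length])
        = (if pat <:+ s ++ [x] then [s.length + 1 - pat.length] else []) := by
      have htk : (s ++ [x]).take (s.length + 1) = s ++ [x] := by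
        apply List.take_of_length_le; simp
      simp only [List.filterMap_cons, List.filterMap_nil, htk]
      by_cases hc : pat <:+ s ++ [x] <;> simp [hc]
    rw [hlastL]
    by_cases hkn : pat.length ≤ s.length + 1
    · have hsp : s.length + 1 + 1 - pat.length = (s.length + 1 - pat.length) + 1 := by omega
      rw [hsp, List.range_succ, List.filter_append]
      have hfirst' : (List.range (s.length + 1 - pat.length)).filter
            (fun j => decide (((s ++ [x]).drop j).take pat.length = pat))
          = (List.range (s.length + 1 - pat.length)).filter
            (fun j => decide ((s.drop j).take pat.length = pat)) := by
        apply List.filter_congr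
        intro j hj
        rw [List.mem_range] at hj
        rw [List.drop_append_of_le_length (by omega),
          List.take_append_of_le_length (by rw [List.length_drop]; omega)]
      rw [hfirst']
      congr 1
      -- the last elements agree
      have hdlen : ((s ++ [x]).drop (s.length + 1 - pat.length)).length = pat.length := by
        rw [List.length_drop, List.length_append]; simp; omega
      have htk : ((s ++ [x]).drop (s.length + 1 - pat.length)).take pat.length
          = (s ++ [x]).drop (s.length + 1 - pat.length) := by
        apply List.take_of_length_le; omega
      have hcond : (((s ++ [x]).drop (s.length + 1 - pat.length)).take pat.length = pat)
          ↔ (pat <:+ s ++ [x]) := by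
        rw [htk, List.suffix_iff_eq_drop]
        constructor
        · intro h; rw [← h]; congr 1; simp; omega
        · intro h
          have : (s ++ [x]).length - pat.length = s.length + 1 - pat.length := by simp
          rw [this] at h; exact h.symm
      simp only [List.filter_cons, List.filter_nil]
      by_cases hc : pat <:+ s ++ [x]
      · rw [if_pos hc, if_pos (by simpa using hcond.mpr hc)]
      · rw [if_neg hc, if_neg (by simpa using fun h => hc (hcond.mp h))]
    · have h0 : s.length + 1 + 1 - pat.length = 0 := by omega
      have h0' : s.length + 1 - pat.length = 0 := by omega
      rw [h0, h0']
      have hns : ¬ pat <:+ s ++ [x] := by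
        intro h
        have := h.length_le
        simp at this; omega
      rw [if_neg hns]
      simp

theorem foldl_append_ite {α β : Type} (p : α → Prop) [DecidablePred p] (f : α → β) :
    ∀ (l : List α) (acc : List β),
      l.foldl (fun acc x => if p x then acc ++ [f x] else acc) acc
        = acc ++ (l.filter (fun x => decide (p x))).map f := by
  intro l
  induction l with
  | nil => simp
  | cons a l ih =>
    intro acc
    by_cases h : p a <;> simp [List.foldl_cons, h, ih] 

theorem inner_eq (sequence sub : List String) (hk : 0 < sequence.length) :
    ((PySem.List.pyRange 0 ((sub.length : Int) - sequence.length + 1) 1).filter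
        (fun j => decide (PySem.List.slice sub (some j) (some (j + (sequence.length : Int))) = sequence)))
      = ((kmpFind sequence (kmpFail sequence) sub 0 0).map (fun j : Nat => (j : Int))) := by
  have hfail := kmpFail_spec sequence hk
  have hkq0 : kQ sequence [] = 0 := by unfold kQ; simp
  have hfind := kmpFind_spec sequence (kmpFail sequence) hfail hk sub []
  simp only [List.length_nil, hkq0, List.nil_append, Nat.zero_add] at hfind
  rw [hfind, reindex sequence hk sub]
  have hpy : PySem.List.pyRange 0 ((sub.length : Int) - sequence.length + 1) 1
      = (List.range (sub.length + 1 - sequence.length)).map (fun j : Nat => (j : Int)) := by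
    by_cases hkn : sequence.length ≤ sub.length + 1
    · have hcast : ((sub.length : Int) - sequence.length + 1)
          = ((sub.length + 1 - sequence.length : Nat) : Int) := by omega
      rw [hcast]
      exact PySem.List.pyRange_zero_nat _
    · have h1 : (sub.length : Int) - sequence.length + 1 ≤ 0 := by omega
      rw [PySem.List.pyRange_one_eq_nil h1]
      have h2 : sub.length + 1 - sequence.length = 0 := by omega
      rw [h2]; simp
  rw [hpy, List.filter_map]
  congr 1
  apply List.filter_congr
  intro j hj
  simp only [Function.comp_apply]
  rw [PySem.List.slice_natCast_add]

theorem A_flat (data : List (List String)) (sequence : List String) :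
    searchSeq data sequence
      = (PySem.List.enumerate data 0).flatMap (fun p =>
          ((PySem.List.pyRange 0 ((p.2.length : Int) - sequence.length + 1) 1).filter
            (fun j => decide (PySem.List.slice p.2 (some j) (some (j + (sequence.length : Int))) = sequence))).map
            (fun j => (p.1, j))) := by
  unfold searchSeq
  simp only
  have hfun : (fun (indices : List (Int × Int)) (p : Int × List String) =>
      (PySem.List.pyRange 0 ((p.2.length : Int) - (sequence.length : Int) + 1) 1).foldl
        (fun ind j => if PySem.List.slice p.2 (some j) (some (j + (sequence.length : Int))) = sequence
          then ind ++ [(p.1, j)] else ind) indices)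
      = (fun indices p => indices ++
          ((PySem.List.pyRange 0 ((p.2.length : Int) - (sequence.length : Int) + 1) 1).filter
            (fun j => decide (PySem.List.slice p.2 (some j) (some (j + (sequence.length : Int))) = sequence))).map
            (fun j => (p.1, j))) := by
    funext indices p
    exact foldl_append_ite _ _ _ _
  rw [hfun, PySem.List.foldl_append_eq_flatMap, List.nil_append]

-- ===== VERDICT (by name: the statement is the Claim_ definition above) =====
theorem searchSeq_spec : Claim_equal_searchSeq := by
  intro data sequence _
  unfold Spec_searchSeq
  rw [A_flat]
  unfold searchSeq_alt
  simp only
  by_cases hk : sequence.length = 0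
  · rw [if_pos hk]
    have hseq : sequence = [] := List.length_eq_zero_iff.mp hk
    subst hseq
    congr 1
    funext p
    simp only [List.length_nil, Nat.cast_zero, sub_zero, add_zero]
    have h1 : ((p.2.length : Int) + 1) = ((p.2.length + 1 : Nat) : Int) := by push_cast; ring
    rw [h1, PySem.List.pyRange_zero_nat]
    rw [List.filter_eq_self.mpr]
    · simp [List.map_map, Function.comp]
    · intro a ha
      obtain ⟨j, _, rfl⟩ := List.mem_map.mp ha
      simp [PySem.List.slice_natCast]
  · rw [if_neg hk]
    congr 1
    funext p
    rw [inner_eq sequence p.2 (Nat.pos_of_ne_zero hk)]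
    simp [List.map_map, Function.comp]
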